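-- pv_equiv track=rewrite | github.com/fsvbach/KernelMethods | Code/util.py | kmer2int
-- ===== SOURCE A (Python) =====
-- def kmer2int(kmer):
--     to_int = { 'A' : 0, 'C': 1, 'G' : 2, 'T' : 3}
--     res = 0
--     for l in kmer:
--         res |= to_int[l]
--         res <<= 2
--     res >>= 2
--     return res
-- ===== SOURCE B (Python) =====
-- def kmer2int(kmer):
--     res = 0
--     weight = 1
--     for c in reversed(kmer):
--         res += "ACGT".index(c) * weight
--         weight *= 4
--     return res
-- ===== Notes on version B (the rewrite author's own statement) =====
-- stated objective: alternative
-- what changed: Replaces A's left-to-right or/shift accumulator with trailing >>2 correction by a right-to-left pass carrying a running weight (res += index*weight; weight *= 4), looking bases up via str.index on the 4-letter alphabet string instead of a dict.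
import Mathlib
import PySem

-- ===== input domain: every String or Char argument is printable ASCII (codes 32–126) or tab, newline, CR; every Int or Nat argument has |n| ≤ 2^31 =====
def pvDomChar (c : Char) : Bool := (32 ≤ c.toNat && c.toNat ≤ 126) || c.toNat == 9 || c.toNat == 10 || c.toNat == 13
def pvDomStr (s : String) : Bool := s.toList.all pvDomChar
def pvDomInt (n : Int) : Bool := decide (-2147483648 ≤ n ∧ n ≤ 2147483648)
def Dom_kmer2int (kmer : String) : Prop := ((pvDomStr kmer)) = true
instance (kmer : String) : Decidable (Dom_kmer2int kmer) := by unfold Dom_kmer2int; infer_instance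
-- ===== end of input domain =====

-- B replaces A's or/shift accumulator (with its trailing >>2 correction) by a right-to-left
-- pass carrying a running weight and an "ACGT".index lookup (alternative decomposition, same cost).

-- ===== PORT A =====
-- the dict literal { 'A':0, 'C':1, 'G':2, 'T':3 }
def toIntA : PySem.Dict Char Int :=
  PySem.Dict.ofList [('A', 0), ('C', 1), ('G', 2), ('T', 3)]

-- getD … 0 stands for to_int[l]; Pre_ excludes the KeyError inputs, so the default is never hit on Pre_.
def kmer2int (kmer : String) : Int :=
  let res : Int :=
    kmer.toList.foldl (fun res l => (PySem.Int.bor res (toIntA.getD l 0)) <<< (2:Nat)) 0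
  res >>> (2:Nat)

-- ===== PORT B =====
-- "ACGT".index(c); getD 0 stands for the ValueError case, which Pre_ excludes.
def baseIdx (c : Char) : Int :=
  ((PySem.List.index? "ACGT".toList c).getD 0 : Nat)

-- for c in reversed(kmer): res += "ACGT".index(c) * weight; weight *= 4
def kmer2int_alt (kmer : String) : Int :=
  (kmer.toList.reverse.foldl
      (fun (st : Int × Int) c => (st.1 + baseIdx c * st.2, st.2 * 4)) (0, 1)).1

-- ===== PRECONDITION & SPEC =====
-- Pre_ excludes exactly the strings containing a character other than the four bases A, C, G, T,
-- on which A raises KeyError (and B raises ValueError).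
def Pre_kmer2int (kmer : String) : Prop :=
  (kmer.toList.all (fun c => c == 'A' || c == 'C' || c == 'G' || c == 'T')) = true
instance (kmer : String) : Decidable (Pre_kmer2int kmer) := by unfold Pre_kmer2int; infer_instance

def pvWitness_kmer2int : String := "GATTACA"

def Spec_kmer2int (kmer : String) (out : Int) : Prop := out = kmer2int_alt kmer
instance (kmer : String) (out : Int) : Decidable (Spec_kmer2int kmer out) := by unfold Spec_kmer2int; infer_instance

-- ===== CLAIM (what is proved, stated in full; the proofs are below) =====
def Claim_equal_kmer2int : Prop :=
  ∀ (kmer : String), Dom_kmer2int kmer → Pre_kmer2int kmer → Spec_kmer2int kmer (kmer2int kmer)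

-- ===== LEMMAS AND PROOFS =====

-- base value of a character (proof-side abbreviation of A's dict lookup)
def bval (c : Char) : Int := toIntA.getD c 0

-- positional value of a k-mer, defined structurally (the common middle ground)
def psum : List Char → Int
  | [] => 0
  | c :: t => bval c * 4 ^ t.length + psum t

theorem bval_nonneg_lt {c : Char} (h : c = 'A' ∨ c = 'C' ∨ c = 'G' ∨ c = 'T') :
    0 ≤ bval c ∧ bval c < 4 := by
  rcases h with h | h | h | h <;> subst h <;> decide

-- B's lookup agrees with A's on the four bases
theorem baseIdx_eq_bval {c : Char} (h : c = 'A' ∨ c = 'C' ∨ c = 'G' ∨ c = 'T') :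
    baseIdx c = bval c := by
  rcases h with h | h | h | h <;> subst h <;> decide

-- disjoint-bit Nat fact behind 'res |= v' when res ends in two zero bits
theorem nat_lor_four (m w : Nat) (hw : w < 4) : (4 * m) ||| w = 4 * m + w := by
  have hm : 4 * m = Nat.bit false (Nat.bit false m) := by simp [Nat.bit_val]; ring
  interval_cases w
  · simp
  · rw [hm, show (1:Nat) = Nat.bit true (Nat.bit false 0) from rfl, Nat.lor_bit, Nat.lor_bit]
    simp [Nat.bit_val]
  · rw [hm, show (2:Nat) = Nat.bit false (Nat.bit true 0) from rfl, Nat.lor_bit, Nat.lor_bit]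
    simp [Nat.bit_val]
    omega
  · rw [hm, show (3:Nat) = Nat.bit true (Nat.bit true 0) from rfl, Nat.lor_bit, Nat.lor_bit]
    simp [Nat.bit_val]
    omega

theorem bor_four (h v : Int) (hh : 0 ≤ h) (hv0 : 0 ≤ v) (hv : v < 4) :
    PySem.Int.bor (4 * h) v = 4 * h + v := by
  rw [PySem.Int.bor_of_nonneg (by omega) hv0]
  have : (4 * h).toNat = 4 * h.toNat := by omega
  rw [this, nat_lor_four h.toNat v.toNat (by omega)]
  omega

theorem psum_nonneg (l : List Char) (hl : ∀ c ∈ l, c = 'A' ∨ c = 'C' ∨ c = 'G' ∨ c = 'T') :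
    0 ≤ psum l := by
  induction l with
  | nil => simp [psum]
  | cons c t ih =>
    have hc := bval_nonneg_lt (hl c (by simp))
    have ht := ih (fun x hx => hl x (by simp [hx]))
    have : (0:Int) ≤ bval c * 4 ^ t.length :=
      mul_nonneg hc.1 (by positivity)
    simp [psum]; omega

-- A's loop computes 4 * psum (invariant: the accumulator always ends in two zero bits)
theorem loopA (l : List Char) (hl : ∀ c ∈ l, c = 'A' ∨ c = 'C' ∨ c = 'G' ∨ c = 'T')
    (h : Int) (hh : 0 ≤ h) :
    l.foldl (fun res c => (PySem.Int.bor res (toIntA.getD c 0)) <<< (2:Nat)) (4 * h)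
      = 4 * (h * 4 ^ l.length + psum l) := by
  induction l generalizing h with
  | nil => simp [psum]
  | cons c t ih =>
    have hc := bval_nonneg_lt (hl c (by simp))
    have hstep : (PySem.Int.bor (4 * h) (toIntA.getD c 0)) <<< (2:Nat) = 4 * (4 * h + bval c) := by
      rw [show toIntA.getD c 0 = bval c from rfl, bor_four h (bval c) hh hc.1 hc.2]
      simp [Int.shiftLeft_eq]
      ring
    rw [List.foldl_cons, hstep, ih (fun x hx => hl x (by simp [hx])) _ (by omega)]
    simp [psum, List.length_cons]
    ring

-- B's reversed loop, read as a foldr on the original list, computes (psum, 4^length)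
theorem loopB (l : List Char) (hl : ∀ c ∈ l, c = 'A' ∨ c = 'C' ∨ c = 'G' ∨ c = 'T') :
    l.reverse.foldl (fun (st : Int × Int) c => (st.1 + baseIdx c * st.2, st.2 * 4)) (0, 1)
      = (psum l, 4 ^ l.length) := by
  rw [List.foldl_reverse]
  induction l with
  | nil => simp [psum]
  | cons c t ih =>
    rw [List.foldr_cons, ih (fun x hx => hl x (by simp [hx]))]
    simp [psum, baseIdx_eq_bval (hl c (by simp)), List.length_cons, pow_succ]
    ring

-- (4*x) >>> 2 recovers x for nonnegative x (Python's trailing shift-correction)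
theorem shiftr4 (x : Int) (hx : 0 ≤ x) : (4 * x) >>> (2:Nat) = x := by
  obtain ⟨n, rfl⟩ := Int.eq_ofNat_of_zero_le hx
  rw [show (4 * (n:Int)) = ((4 * n : Nat) : Int) by push_cast; ring]
  rw [show ((4 * n : Nat) : Int) >>> (2:Nat) = (((4 * n) >>> 2 : Nat) : Int) from rfl]
  simp [Nat.shiftRight_eq_div_pow]

-- ===== VERDICT (by name: the statement is the Claim_ definition above) =====
theorem kmer2int_spec : Claim_equal_kmer2int := by
  intro kmer _ hpre0
  have hpre : ∀ c ∈ kmer.toList, c = 'A' ∨ c = 'C' ∨ c = 'G' ∨ c = 'T' := by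
    intro c hc
    have := List.all_eq_true.mp hpre0 c hc
    simp only [Bool.or_eq_true, beq_iff_eq] at this
    tauto
  unfold Spec_kmer2int
  show (kmer.toList.foldl (fun res l => (PySem.Int.bor res (toIntA.getD l 0)) <<< (2:Nat)) 0) >>> (2:Nat)
      = kmer2int_alt kmer
  have hA := loopA kmer.toList hpre 0 le_rfl
  simp only [mul_zero] at hA
  have hps := psum_nonneg kmer.toList hpre
  have h0 : (0:Int) * 4 ^ kmer.toList.length + psum kmer.toList = psum kmer.toList := by ring
  rw [hA, h0, shiftr4 _ hps]
  unfold kmer2int_alt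
  rw [loopB kmer.toList hpre]
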